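-- pv_equiv track=rewrite | github.com/light0220/Excel-operate | excel_operate/list_operate.py | is_insert
-- ===== SOURCE A (Python) =====
-- def is_insert(srcl: list, tagl: list):
--     '''===================================\n
--     传入两个列表，判断目标列表是否为原列表插入元素所得。如果判断为是则返回一个以插入位置索引为键，该索引位置插入的元素个数为值的一个字典；否则返回None。
--     srcl: 原列表
--     tagl: 目标列表
--     '''
--     insert_info = {}
--     for i in range(len(tagl)):
--         if tagl[i] not in srcl:
--             for ins in range(1, len(tagl)-i):
--                 if tagl[i+ins] in srcl:
--                     if srcl.index(tagl[i+ins]) not in insert_info: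
--                         insert_info[srcl.index(tagl[i+ins])] = 1
--                     else:
--                         insert_info[srcl.index(tagl[i+ins])] += 1
--                     break
--     if insert_info == {}:
--         return None
--     else:
--         return insert_info
-- ===== SOURCE B (Python) =====
-- def is_insert(srcl: list, tagl: list):
--     '''Single-pass re-implementation: O(len(srcl)+len(tagl)) via a membership set
--     and a value->first-index dict; counts runs of inserted elements and charges
--     each run to the first index (in srcl) of the next element found in srcl.'''
--     srcset = set(srcl)
--     first_index = {}
--     for j, v in enumerate(srcl):
--         if v not in first_index:
--             first_index[v] = j
--     info = {}
--     run = 0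
--     for x in tagl:
--         if x in srcset:
--             if run:
--                 k = first_index[x]
--                 info[k] = info.get(k, 0) + run
--                 run = 0
--         else:
--             run += 1
--     return info or None
-- ===== Notes on version B (the rewrite author's own statement) =====
-- stated objective: faster
-- what changed: Replaced the per-index nested forward scan with repeated list membership tests and list.index calls by one linear pass over tagl that counts runs of non-source elements, using a precomputed membership set and a value-to-first-index dict for srcl.
import Mathlib
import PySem

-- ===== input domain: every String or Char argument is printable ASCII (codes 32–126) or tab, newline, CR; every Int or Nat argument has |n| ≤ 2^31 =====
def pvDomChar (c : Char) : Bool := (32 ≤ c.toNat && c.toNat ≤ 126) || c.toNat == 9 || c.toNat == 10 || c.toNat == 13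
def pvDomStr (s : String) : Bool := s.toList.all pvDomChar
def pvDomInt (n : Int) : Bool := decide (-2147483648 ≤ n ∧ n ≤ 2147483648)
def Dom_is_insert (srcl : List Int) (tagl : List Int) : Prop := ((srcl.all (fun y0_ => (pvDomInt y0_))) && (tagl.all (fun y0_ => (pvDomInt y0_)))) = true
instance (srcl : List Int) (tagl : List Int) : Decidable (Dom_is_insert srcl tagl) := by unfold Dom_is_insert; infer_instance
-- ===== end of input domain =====

-- B replaces A's nested forward scans and repeated list.index calls by one linear pass
-- over tagl with a precomputed membership set and value→first-index dict (objective: faster).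

-- ===== PORT A =====
-- inner 'for ins in range(1, len(tagl)-i): … break' loop of A; the '.getD 0' after
-- index? is unreachable (it is guarded by the membership test, where index? is some)
def isInsertInner (srcl : List Int) (tagl : List Int) (i : Int) :
    List Int → PySem.Dict Int Int → PySem.Dict Int Int
  | [], d => d
  | ins :: rest, d =>
    if PySem.List.pyGetD tagl (i + ins) 0 ∈ srcl then
      let k : Int := (((PySem.List.index? srcl (PySem.List.pyGetD tagl (i + ins) 0)).getD 0 : Nat) : Int)
      if ¬ d.contains k then d.insert k 1 else d.modify k 0 (· + 1)
    else isInsertInner srcl tagl i rest d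

def is_insert (srcl : List Int) (tagl : List Int) : Option (List (Int × Int)) :=
  let info := (PySem.List.pyRange 0 (tagl.length : Int) 1).foldl
    (fun d i =>
      if PySem.List.pyGetD tagl i 0 ∉ srcl then
        isInsertInner srcl tagl i (PySem.List.pyRange 1 ((tagl.length : Int) - i) 1) d
      else d)
    PySem.Dict.empty
  if info = PySem.Dict.empty then none else some info.items

-- ===== PORT B =====
-- first_index = {} ; for j, v in enumerate(srcl): if v not in first_index: first_index[v] = j
def firstIndexDict (srcl : List Int) : PySem.Dict Int Int :=
  (PySem.List.enumerate srcl 0).foldl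
    (fun d jv => if ¬ d.contains jv.2 then d.insert jv.2 jv.1 else d)
    PySem.Dict.empty

-- 'first_index[x]' is guarded by 'x in srcset', where the key is present; '.getD x 0' is that lookup
def is_insert_alt (srcl : List Int) (tagl : List Int) : Option (List (Int × Int)) :=
  let srcset := PySem.Set.ofList srcl
  let fi := firstIndexDict srcl
  let st := tagl.foldl
    (fun (s : PySem.Dict Int Int × Int) x =>
      if PySem.Set.contains srcset x then
        if s.2 ≠ 0 then
          let k := fi.getD x 0
          (s.1.insert k (s.1.getD k 0 + s.2), 0)
        else s
      else (s.1, s.2 + 1))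
    (PySem.Dict.empty, 0)
  if st.1 = PySem.Dict.empty then none else some st.1.items

-- ===== PRECONDITION & SPEC =====
def Spec_is_insert (srcl : List Int) (tagl : List Int) (out : Option (List (Int × Int))) : Prop := out = is_insert_alt srcl tagl
instance (srcl : List Int) (tagl : List Int) (out : Option (List (Int × Int))) : Decidable (Spec_is_insert srcl tagl out) := by unfold Spec_is_insert; infer_instance

-- ===== CLAIM (what is proved, stated in full; the proofs are below) =====
def Claim_equal_is_insert : Prop := ∀ (srcl : List Int) (tagl : List Int), Dom_is_insert srcl tagl → Spec_is_insert srcl tagl (is_insert srcl tagl)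

-- ===== LEMMAS AND PROOFS =====

-- first index of x in srcl, as the Int key both programs use
def idxKey (srcl : List Int) (x : Int) : Int :=
  (((PySem.List.index? srcl x).getD 0 : Nat) : Int)

-- key of the first element of a suffix of tagl that lies in srcl
def nextKey (srcl : List Int) : List Int → Option Int
  | [] => none
  | y :: rest => if y ∈ srcl then some (idxKey srcl y) else nextKey srcl rest

def bump (d : PySem.Dict Int Int) (k n : Int) : PySem.Dict Int Int :=
  d.insert k (d.getD k 0 + n)

-- middle form: for each non-source element with a later source element, bump that key by 1
def stepA (srcl : List Int) : List Int → PySem.Dict Int Int → PySem.Dict Int Int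
  | [], d => d
  | x :: rest, d =>
    if x ∈ srcl then stepA srcl rest d
    else match nextKey srcl rest with
      | none => stepA srcl rest d
      | some k => stepA srcl rest (bump d k 1)

def addK (d : PySem.Dict Int Int) (k : Int) : Option Int → PySem.Dict Int Int
  | none => d
  | some key => if k = 0 then d else bump d key k

lemma update_eq_bump (d : PySem.Dict Int Int) (k : Int) :
    (if ¬ d.contains k then d.insert k 1 else d.modify k 0 (· + 1)) = bump d k 1 := by
  by_cases h : d.contains k = true
  · simp [h, PySem.Dict.modify, bump]
  · have h' : d.contains k = false := by simpa using h
    simp [h', bump, PySem.Dict.getD_of_not_contains d 0 h']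

lemma inner_eq_nextKey (srcl tagl : List Int) (m j : Nat) (d : PySem.Dict Int Int) :
    isInsertInner srcl tagl (m : Int) (PySem.List.pyRange (j : Int) ((tagl.length : Int) - (m : Int)) 1) d
      = (match nextKey srcl (tagl.drop (m + j)) with
         | none => d
         | some k => bump d k 1) := by
  induction hn : tagl.length - (m + j) generalizing j d with
  | zero =>
      rw [PySem.List.pyRange_one_eq_nil (by omega)]
      rw [List.drop_eq_nil_of_le (by omega)]
      simp [isInsertInner, nextKey]
  | succ n ih =>
      have hlt : m + j < tagl.length := by omega
      rw [PySem.List.pyRange_one_cons (by omega)]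
      rw [List.drop_eq_getElem_cons hlt]
      have hget : PySem.List.pyGetD tagl ((m : Int) + (j : Int)) 0 = tagl[m + j] := by
        rw [← Nat.cast_add, PySem.List.pyGetD_natCast]
        exact List.getD_eq_getElem tagl 0 hlt
      by_cases hm : tagl[m + j] ∈ srcl
      · simp only [isInsertInner, hget, if_pos hm, nextKey]
        rw [update_eq_bump]
        simp [idxKey]
      · simp only [isInsertInner, hget, if_neg hm, nextKey]
        have hc : ((j : Int) + 1) = ((j + 1 : Nat) : Int) := by push_cast; ring
        rw [hc, ih (j + 1) d (by omega)]
        have : m + (j + 1) = m + j + 1 := by omega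
        rw [this]

lemma outer_eq_stepA (srcl tagl : List Int) (m : Nat) (d : PySem.Dict Int Int) :
    (PySem.List.pyRange (m : Int) ((tagl.length : Int)) 1).foldl
      (fun d i =>
        if PySem.List.pyGetD tagl i 0 ∉ srcl then
          isInsertInner srcl tagl i (PySem.List.pyRange 1 ((tagl.length : Int) - i) 1) d
        else d) d
      = stepA srcl (tagl.drop m) d := by
  induction hn : tagl.length - m generalizing m d with
  | zero =>
      rw [PySem.List.pyRange_one_eq_nil (by omega)]
      rw [List.drop_eq_nil_of_le (by omega)]
      simp [stepA]
  | succ n ih =>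
      have hlt : m < tagl.length := by omega
      rw [PySem.List.pyRange_one_cons (by omega)]
      rw [List.drop_eq_getElem_cons hlt]
      have hget : PySem.List.pyGetD tagl (m : Int) 0 = tagl[m] := by
        rw [PySem.List.pyGetD_natCast]
        exact List.getD_eq_getElem tagl 0 hlt
      simp only [List.foldl_cons, hget]
      have hc : ((m : Int) + 1) = ((m + 1 : Nat) : Int) := by push_cast; ring
      by_cases hm : tagl[m] ∈ srcl
      · rw [if_neg (not_not_intro hm), hc, ih (m + 1) d (by omega)]
        simp [stepA, hm]
      · rw [if_pos hm]
        have hin := inner_eq_nextKey srcl tagl m 1 d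
        push_cast at hin
        rw [hin]
        cases hnk : nextKey srcl (tagl.drop (m + 1)) with
        | none =>
            rw [hc, ih (m + 1) d (by omega)]
            simp [stepA, hm, hnk]
        | some k =>
            rw [hc, ih (m + 1) (bump d k 1) (by omega)]
            simp [stepA, hm, hnk]

lemma fold_get?_of_contains (l : List (Int × Int)) :
    ∀ (d : PySem.Dict Int Int) (x : Int), d.contains x = true →
      (l.foldl (fun d jv => if ¬ d.contains jv.2 then d.insert jv.2 jv.1 else d) d).get? x = d.get? x := by
  induction l with
  | nil => intro d x _; rfl
  | cons p rest ih =>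
      intro d x h
      simp only [List.foldl_cons]
      by_cases hc : d.contains p.2 = true
      · rw [if_neg (by simp [hc])]
        exact ih d x h
      · have hc' : d.contains p.2 = false := by simpa using hc
        rw [if_pos (by simp [hc'])]
        have hne : x ≠ p.2 := by
          rintro rfl; rw [h] at hc'; exact absurd hc' (by simp)
        have hcont : (d.insert p.2 p.1).contains x = true := by
          simp [PySem.Dict.contains_insert, h]
        rw [ih _ x hcont]
        simp [PySem.Dict.get?_insert_of_ne, hne]

lemma fiAux (l : List Int) :
    ∀ (s : Int) (d : PySem.Dict Int Int) (x : Int), x ∈ l → d.contains x = false →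
      ((PySem.List.enumerate l s).foldl (fun d jv => if ¬ d.contains jv.2 then d.insert jv.2 jv.1 else d) d).get? x
        = some (s + (((PySem.List.index? l x).getD 0 : Nat) : Int)) := by
  induction l with
  | nil => intro s d x hx _; cases hx
  | cons y rest ih =>
      intro s d x hx hdx
      rw [PySem.List.enumerate_cons]
      simp only [List.foldl_cons]
      by_cases hxy : x = y
      · subst hxy
        rw [if_pos (by simp [hdx])]
        rw [fold_get?_of_contains _ _ _ (PySem.Dict.contains_insert_self d x s)]
        rw [PySem.Dict.get?_insert_self]
        rw [PySem.List.index?_cons_self]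
        simp
      · have hx' : x ∈ rest := (List.mem_cons.mp hx).resolve_left hxy
        rw [PySem.List.index?_cons_of_ne rest (Ne.symm hxy)]
        cases hi : PySem.List.index? rest x with
        | none => exact absurd hi (by simp [hx'])
        | some i =>
            by_cases hcy : d.contains y = true
            · rw [if_neg (by simp [hcy])]
              rw [ih (s + 1) d x hx' hdx, hi]
              simp; ring
            · have hcy' : d.contains y = false := by simpa using hcy
              rw [if_pos (by simp [hcy'])]
              have hdx' : (d.insert y s).contains x = false := by
                simp [PySem.Dict.contains_insert, hxy, hdx]
              rw [ih (s + 1) _ x hx' hdx', hi]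
              simp; ring

lemma fi_getD (srcl : List Int) (x : Int) (hx : x ∈ srcl) :
    (firstIndexDict srcl).getD x 0 = idxKey srcl x := by
  have h2 : (firstIndexDict srcl).get? x
      = some (0 + (((PySem.List.index? srcl x).getD 0 : Nat) : Int)) :=
    fiAux srcl 0 PySem.Dict.empty x hx (by simp)
  unfold idxKey
  simp [PySem.Dict.getD, h2]

lemma bump_addK (d : PySem.Dict Int Int) (key k : Int) (hk : 0 ≤ k) :
    bump (addK d k (some key)) key 1 = addK d (k + 1) (some key) := by
  by_cases h0 : k = 0
  · subst h0; simp [addK, bump]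
  · simp only [addK, if_neg h0, if_neg (by omega : ¬ (k + 1 = 0))]
    simp only [bump, PySem.Dict.getD_insert_self, PySem.Dict.insert_insert_self]
    ring_nf

lemma foldB_eq_stepA (srcl : List Int) (l : List Int) (d : PySem.Dict Int Int) (k : Int)
    (hk : 0 ≤ k) :
    (l.foldl
      (fun (s : PySem.Dict Int Int × Int) x =>
        if PySem.Set.contains (PySem.Set.ofList srcl) x then
          if s.2 ≠ 0 then
            let key := (firstIndexDict srcl).getD x 0
            (s.1.insert key (s.1.getD key 0 + s.2), 0)
          else s
        else (s.1, s.2 + 1)) (d, k)).1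
      = stepA srcl l (addK d k (nextKey srcl l)) := by
  induction l generalizing d k with
  | nil =>
      cases hnk : nextKey srcl ([] : List Int) with
      | none => simp [stepA, addK]
      | some key => simp [nextKey] at hnk
  | cons x rest ih =>
      simp only [List.foldl_cons]
      by_cases hx : x ∈ srcl
      · have hs : PySem.Set.contains (PySem.Set.ofList srcl) x = true := by
          simp [PySem.Set.contains, PySem.Set.mem_ofList, hx]
        by_cases hk0 : k = 0
        · subst hk0
          simp only [hs, if_true, if_neg (by simp : ¬ ((d, (0:Int)).2 ≠ 0))]
          rw [ih d 0 le_rfl]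
          cases hnk : nextKey srcl rest with
          | none => simp [stepA, nextKey, addK, hx]
          | some key => simp [stepA, nextKey, addK, hx]
        · simp only [hs, if_true, if_pos (by simpa using hk0 : ((d, k).2 ≠ 0))]
          rw [ih _ 0 le_rfl]
          have hkey : (firstIndexDict srcl).getD x 0 = idxKey srcl x := fi_getD srcl x hx
          cases hnk : nextKey srcl rest with
          | none =>
              simp [stepA, nextKey, addK, hx, hk0, bump, hkey]
          | some key =>
              simp [stepA, nextKey, addK, hx, hk0, bump, hkey]
      · have hs : PySem.Set.contains (PySem.Set.ofList srcl) x = false := by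
          simp [PySem.Set.contains, PySem.Set.mem_ofList, hx]
        simp only [hs, Bool.false_eq_true, if_false]
        rw [ih d (k + 1) (by omega)]
        have hnx : nextKey srcl (x :: rest) = nextKey srcl rest := by
          simp [nextKey, hx]
        rw [hnx]
        cases hnk : nextKey srcl rest with
        | none => simp [stepA, addK, hx, hnk]
        | some key =>
            simp only [stepA, if_neg hx, hnk]
            rw [bump_addK d key k hk]

-- ===== VERDICT (by name: the statement is the Claim_ definition above) =====
theorem is_insert_spec : Claim_equal_is_insert := by
  intro srcl tagl _
  unfold Spec_is_insert is_insert is_insert_alt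
  dsimp only
  have hA := outer_eq_stepA srcl tagl 0 PySem.Dict.empty
  push_cast at hA
  rw [List.drop_zero] at hA
  have hB := foldB_eq_stepA srcl tagl PySem.Dict.empty 0 le_rfl
  have hB' : (tagl.foldl
      (fun (s : PySem.Dict Int Int × Int) x =>
        if PySem.Set.contains (PySem.Set.ofList srcl) x then
          if s.2 ≠ 0 then
            let key := (firstIndexDict srcl).getD x 0
            (s.1.insert key (s.1.getD key 0 + s.2), 0)
          else s
        else (s.1, s.2 + 1)) (PySem.Dict.empty, 0)).1 = stepA srcl tagl PySem.Dict.empty := by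
    rw [hB]
    cases hnk : nextKey srcl tagl with
    | none => simp [addK]
    | some key => simp [addK]
  rw [hA, hB']
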